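-- pv_equiv track=rewrite | github.com/Lajnold/adventofcode2018 | day18/day18.py | resource_value
-- ===== SOURCE A (Python) =====
-- TREES = '|'
--
-- LUMBERYARD = '#'
--
-- def resource_value(state):
--     trees = sum(
--         1
--         for line in state
--         for c in line
--         if c == TREES)
--
--     lumberyards = sum(
--         1
--         for line in state
--         for c in line
--         if c == LUMBERYARD)
--
--     return trees * lumberyards
-- ===== SOURCE B (Python) =====
-- TREES = '|'
--
-- LUMBERYARD = '#'
--
-- def resource_value(state):
--     trees = 0
--     lumberyards = 0
--     for line in state:
--         for c in line:
--             if c == TREES: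
--                 trees += 1
--             elif c == LUMBERYARD:
--                 lumberyards += 1
--     return trees * lumberyards
-- ===== Notes on version B (the rewrite author's own statement) =====
-- stated objective: alternative
-- what changed: Single pass over the grid maintaining two counters (trees, lumberyards) instead of two independent full scans, one per symbol.
import Mathlib
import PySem

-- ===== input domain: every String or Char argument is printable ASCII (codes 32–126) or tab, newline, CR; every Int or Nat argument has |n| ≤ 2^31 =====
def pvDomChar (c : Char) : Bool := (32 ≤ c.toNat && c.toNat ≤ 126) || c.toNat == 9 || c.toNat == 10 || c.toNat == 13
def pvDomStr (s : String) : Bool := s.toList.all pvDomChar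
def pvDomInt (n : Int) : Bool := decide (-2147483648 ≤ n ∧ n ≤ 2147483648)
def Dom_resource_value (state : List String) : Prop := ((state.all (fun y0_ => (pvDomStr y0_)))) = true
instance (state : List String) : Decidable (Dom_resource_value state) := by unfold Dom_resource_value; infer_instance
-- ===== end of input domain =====

-- B makes one pass with two counters where A scans the grid twice (one pass per symbol): alternative decomposition.

-- ===== PORT A =====
-- two independent generator-sum scans, one per symbol
def resource_value (state : List String) : Int :=
  let trees : Int :=
    state.foldl (fun acc line =>
      line.toList.foldl (fun a c => if c = '|' then a + 1 else a) acc) 0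
  let lumberyards : Int :=
    state.foldl (fun acc line =>
      line.toList.foldl (fun a c => if c = '#' then a + 1 else a) acc) 0
  trees * lumberyards

-- ===== PORT B =====
-- one pass, a pair (trees, lumberyards) threaded through every character
def resource_value_alt (state : List String) : Int :=
  let p : Int × Int :=
    state.foldl (fun acc line =>
      line.toList.foldl (fun (a : Int × Int) c =>
        if c = '|' then (a.1 + 1, a.2)
        else if c = '#' then (a.1, a.2 + 1)
        else a) acc) (0, 0)
  p.1 * p.2

-- ===== PRECONDITION & SPEC =====
def Spec_resource_value (state : List String) (out : Int) : Prop := out = resource_value_alt state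
instance (state : List String) (out : Int) : Decidable (Spec_resource_value state out) := by unfold Spec_resource_value; infer_instance

-- ===== CLAIM (what is proved, stated in full; the proofs are below) =====
def Claim_equal_resource_value : Prop := ∀ (state : List String), Dom_resource_value state → Spec_resource_value state (resource_value state)

-- ===== LEMMAS AND PROOFS =====

theorem pair_foldl_chars (l : List Char) (a : Int × Int) :
    l.foldl (fun (a : Int × Int) c =>
        if c = '|' then (a.1 + 1, a.2)
        else if c = '#' then (a.1, a.2 + 1)
        else a) a
    = (l.foldl (fun t c => if c = '|' then t + 1 else t) a.1,
       l.foldl (fun t c => if c = '#' then t + 1 else t) a.2) := by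
  induction l generalizing a with
  | nil => rfl
  | cons c l ih =>
    simp only [List.foldl_cons]
    by_cases h1 : c = '|'
    · simp [h1, ih]
    · by_cases h2 : c = '#' <;> simp [h1, h2, ih]

theorem pair_foldl_lines (state : List String) (a : Int × Int) :
    state.foldl (fun acc line =>
      line.toList.foldl (fun (a : Int × Int) c =>
        if c = '|' then (a.1 + 1, a.2)
        else if c = '#' then (a.1, a.2 + 1)
        else a) acc) a
    = (state.foldl (fun acc line =>
         line.toList.foldl (fun t c => if c = '|' then t + 1 else t) acc) a.1,
       state.foldl (fun acc line =>
         line.toList.foldl (fun t c => if c = '#' then t + 1 else t) acc) a.2) := by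
  induction state generalizing a with
  | nil => rfl
  | cons s rest ih =>
    simp only [List.foldl_cons]
    rw [pair_foldl_chars, ih]

-- ===== VERDICT (by name: the statement is the Claim_ definition above) =====
theorem resource_value_spec : Claim_equal_resource_value := by
  intro state _
  unfold Spec_resource_value resource_value resource_value_alt
  simp [pair_foldl_lines]
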